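-- pv_equiv track=rewrite | github.com/FranklineMisango/EPFL_SURF_2025 | helpers/optimized_osm_cache_downloader.py | _analyze_feature_categories
-- ===== SOURCE A (Python) =====
-- from typing import Dict, List, Tuple, Optional, Any
--
-- def _analyze_feature_categories(columns: List[str]) -> Dict[str, int]:
--     """Analyze feature categories for metadata"""
--     categories = {
--         'traditional_osm': 0,
--         'population': 0,
--         'comprehensive_osm': 0,
--         'coordinates': 0,
--         'other': 0
--     }
--
--     for col in columns:
--         if col.startswith('trad_'):
--             categories['traditional_osm'] += 1
--         elif col.startswith('pop_'):
--             categories['population'] += 1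
--         elif col.startswith('comp_'):
--             categories['comprehensive_osm'] += 1
--         elif col in ['lat', 'lon', 'station_id']:
--             categories['coordinates'] += 1
--         else:
--             categories['other'] += 1
--
--     return categories
-- ===== SOURCE B (Python) =====
-- from typing import Dict, List
--
-- def _analyze_feature_categories(columns: List[str]) -> Dict[str, int]:
--     """Analyze feature categories: four independent filtered counts, 'other' by complement."""
--     trad = sum(1 for c in columns if c.startswith('trad_'))
--     pop = sum(1 for c in columns if c.startswith('pop_'))
--     comp = sum(1 for c in columns if c.startswith('comp_'))
--     coord = sum(1 for c in columns if c in ('lat', 'lon', 'station_id'))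
--     other = len(columns) - trad - pop - comp - coord
--     return {
--         'traditional_osm': trad,
--         'population': pop,
--         'comprehensive_osm': comp,
--         'coordinates': coord,
--         'other': other,
--     }
-- ===== Notes on version B (the rewrite author's own statement) =====
-- stated objective: simpler
-- what changed: Replaces the single elif-cascade loop updating a dict with four independent filtered counts over the columns plus 'other' computed as the complement of the total length, relying on the disjointness of the categories.
import Mathlib
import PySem

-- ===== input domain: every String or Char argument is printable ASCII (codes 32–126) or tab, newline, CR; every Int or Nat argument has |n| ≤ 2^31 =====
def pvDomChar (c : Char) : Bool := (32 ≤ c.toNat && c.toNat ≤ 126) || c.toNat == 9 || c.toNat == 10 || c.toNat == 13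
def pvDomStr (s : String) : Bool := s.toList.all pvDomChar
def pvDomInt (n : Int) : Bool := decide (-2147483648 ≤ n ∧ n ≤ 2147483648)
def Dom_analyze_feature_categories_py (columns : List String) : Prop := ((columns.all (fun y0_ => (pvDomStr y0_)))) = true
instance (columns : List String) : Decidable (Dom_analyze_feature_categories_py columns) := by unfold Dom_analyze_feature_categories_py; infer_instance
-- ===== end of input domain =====

-- B replaces A's single elif-cascade dict-updating loop by four independent filtered
-- counts plus 'other' computed as the complement of the total length (objective: simpler).

-- ===== PORT A =====
def analyze_feature_categories_py (columns : List String) : List (String × Int) :=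
  let categories : PySem.Dict String Int :=
    (((((PySem.Dict.empty : PySem.Dict String Int)).insert "traditional_osm" 0).insert "population" 0).insert
        "comprehensive_osm" 0).insert "coordinates" 0 |>.insert "other" 0
  let categories := columns.foldl (fun d col =>
    if PySem.Str.startswith col "trad_" then d.modify "traditional_osm" 0 (· + 1)
    else if PySem.Str.startswith col "pop_" then d.modify "population" 0 (· + 1)
    else if PySem.Str.startswith col "comp_" then d.modify "comprehensive_osm" 0 (· + 1)
    else if col == "lat" || col == "lon" || col == "station_id" then d.modify "coordinates" 0 (· + 1)
    else d.modify "other" 0 (· + 1)) categories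
  categories.items

-- ===== PORT B =====
def analyze_feature_categories_py_alt (columns : List String) : List (String × Int) :=
  let trad : Int := columns.countP (fun c => PySem.Str.startswith c "trad_")
  let pop : Int := columns.countP (fun c => PySem.Str.startswith c "pop_")
  let comp : Int := columns.countP (fun c => PySem.Str.startswith c "comp_")
  let coord : Int := columns.countP (fun c => c == "lat" || c == "lon" || c == "station_id")
  let other : Int := (columns.length : Int) - trad - pop - comp - coord
  [("traditional_osm", trad), ("population", pop), ("comprehensive_osm", comp),
   ("coordinates", coord), ("other", other)]

-- ===== PRECONDITION & SPEC =====
def Spec_analyze_feature_categories_py (columns : List String) (out : List (String × Int)) : Prop := out = analyze_feature_categories_py_alt columns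
instance (columns : List String) (out : List (String × Int)) : Decidable (Spec_analyze_feature_categories_py columns out) := by unfold Spec_analyze_feature_categories_py; infer_instance

-- ===== CLAIM (what is proved, stated in full; the proofs are below) =====
def Claim_equal_analyze_feature_categories_py : Prop := ∀ (columns : List String), Dom_analyze_feature_categories_py columns → Spec_analyze_feature_categories_py columns (analyze_feature_categories_py columns)

-- ===== LEMMAS AND PROOFS =====

-- Shorthands for the five branch predicates of A's cascade.
def pvP1 (c : String) : Bool := PySem.Str.startswith c "trad_"
def pvP2 (c : String) : Bool := PySem.Str.startswith c "pop_"
def pvP3 (c : String) : Bool := PySem.Str.startswith c "comp_"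
def pvP4 (c : String) : Bool := c == "lat" || c == "lon" || c == "station_id"

-- One step of A's dict update, on the literal 5-key dict.
theorem pv_m1 (a b c d e : Int) :
    (PySem.Dict.mk [("traditional_osm", a), ("population", b), ("comprehensive_osm", c),
      ("coordinates", d), ("other", e)]).modify "traditional_osm" 0 (· + 1) =
    PySem.Dict.mk [("traditional_osm", a + 1), ("population", b), ("comprehensive_osm", c),
      ("coordinates", d), ("other", e)] := rfl

theorem pv_m2 (a b c d e : Int) :
    (PySem.Dict.mk [("traditional_osm", a), ("population", b), ("comprehensive_osm", c),
      ("coordinates", d), ("other", e)]).modify "population" 0 (· + 1) =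
    PySem.Dict.mk [("traditional_osm", a), ("population", b + 1), ("comprehensive_osm", c),
      ("coordinates", d), ("other", e)] := rfl

theorem pv_m3 (a b c d e : Int) :
    (PySem.Dict.mk [("traditional_osm", a), ("population", b), ("comprehensive_osm", c),
      ("coordinates", d), ("other", e)]).modify "comprehensive_osm" 0 (· + 1) =
    PySem.Dict.mk [("traditional_osm", a), ("population", b), ("comprehensive_osm", c + 1),
      ("coordinates", d), ("other", e)] := rfl

theorem pv_m4 (a b c d e : Int) :
    (PySem.Dict.mk [("traditional_osm", a), ("population", b), ("comprehensive_osm", c),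
      ("coordinates", d), ("other", e)]).modify "coordinates" 0 (· + 1) =
    PySem.Dict.mk [("traditional_osm", a), ("population", b), ("comprehensive_osm", c),
      ("coordinates", d + 1), ("other", e)] := rfl

theorem pv_m5 (a b c d e : Int) :
    (PySem.Dict.mk [("traditional_osm", a), ("population", b), ("comprehensive_osm", c),
      ("coordinates", d), ("other", e)]).modify "other" 0 (· + 1) =
    PySem.Dict.mk [("traditional_osm", a), ("population", b), ("comprehensive_osm", c),
      ("coordinates", d), ("other", e + 1)] := rfl

-- startswith gives a list prefix.
theorem pv_sw_prefix (x p : String) (h : PySem.Str.startswith x p = true) :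
    ∃ t, p.toList ++ t = x.toList := by
  simp only [PySem.Str.startswith_eq, PySem.Chars.startswith_iff] at h
  exact h

-- Pairwise disjointness of the four category tests.
theorem pv_n12 (x : String) : (pvP1 x && pvP2 x) = false := by
  cases h1 : pvP1 x
  · simp
  · cases h2 : pvP2 x
    · simp
    · exfalso
      obtain ⟨t, ht⟩ := pv_sw_prefix x "trad_" h1
      obtain ⟨u, hu⟩ := pv_sw_prefix x "pop_" h2
      rw [← ht] at hu
      have e1 : "trad_".toList = ['t','r','a','d','_'] := rfl
      have e2 : "pop_".toList = ['p','o','p','_'] := rfl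
      rw [e1, e2] at hu
      simp at hu

theorem pv_n13 (x : String) : (pvP1 x && pvP3 x) = false := by
  cases h1 : pvP1 x
  · simp
  · cases h3 : pvP3 x
    · simp
    · exfalso
      obtain ⟨t, ht⟩ := pv_sw_prefix x "trad_" h1
      obtain ⟨u, hu⟩ := pv_sw_prefix x "comp_" h3
      rw [← ht] at hu
      have e1 : "trad_".toList = ['t','r','a','d','_'] := rfl
      have e2 : "comp_".toList = ['c','o','m','p','_'] := rfl
      rw [e1, e2] at hu
      simp at hu

theorem pv_n23 (x : String) : (pvP2 x && pvP3 x) = false := by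
  cases h2 : pvP2 x
  · simp
  · cases h3 : pvP3 x
    · simp
    · exfalso
      obtain ⟨t, ht⟩ := pv_sw_prefix x "pop_" h2
      obtain ⟨u, hu⟩ := pv_sw_prefix x "comp_" h3
      rw [← ht] at hu
      have e1 : "pop_".toList = ['p','o','p','_'] := rfl
      have e2 : "comp_".toList = ['c','o','m','p','_'] := rfl
      rw [e1, e2] at hu
      simp at hu

theorem pv_n4 (x : String) (h4 : pvP4 x = true) :
    pvP1 x = false ∧ pvP2 x = false ∧ pvP3 x = false := by
  have h4' : (x = "lat" ∨ x = "lon") ∨ x = "station_id" := by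
    simpa [pvP4] using h4
  rcases h4' with (h | h) | h <;> subst h <;> exact ⟨by decide, by decide, by decide⟩

theorem pv_n14 (x : String) : (pvP1 x && pvP4 x) = false := by
  cases h4 : pvP4 x
  · simp
  · simp [(pv_n4 x h4).1]

theorem pv_n24 (x : String) : (pvP2 x && pvP4 x) = false := by
  cases h4 : pvP4 x
  · simp
  · simp [(pv_n4 x h4).2.1]

theorem pv_n34 (x : String) : (pvP3 x && pvP4 x) = false := by
  cases h4 : pvP4 x
  · simp
  · simp [(pv_n4 x h4).2.2]

-- The fold of A's cascade over an arbitrary starting count vector.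
theorem pv_fold_items (columns : List String) (a b c d e : Int) :
    (columns.foldl (fun d col =>
      if pvP1 col then d.modify "traditional_osm" 0 (· + 1)
      else if pvP2 col then d.modify "population" 0 (· + 1)
      else if pvP3 col then d.modify "comprehensive_osm" 0 (· + 1)
      else if pvP4 col then d.modify "coordinates" 0 (· + 1)
      else d.modify "other" 0 (· + 1))
      (PySem.Dict.mk [("traditional_osm", a), ("population", b), ("comprehensive_osm", c),
        ("coordinates", d), ("other", e)])).items =
    [("traditional_osm", a + columns.countP pvP1),
     ("population", b + columns.countP (fun x => !pvP1 x && pvP2 x)),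
     ("comprehensive_osm", c + columns.countP (fun x => !pvP1 x && !pvP2 x && pvP3 x)),
     ("coordinates", d + columns.countP (fun x => !pvP1 x && !pvP2 x && !pvP3 x && pvP4 x)),
     ("other", e + columns.countP (fun x => !pvP1 x && !pvP2 x && !pvP3 x && !pvP4 x))] := by
  induction columns generalizing a b c d e with
  | nil => simp
  | cons x xs ih =>
    cases h1 : pvP1 x <;> cases h2 : pvP2 x <;> cases h3 : pvP3 x <;> cases h4 : pvP4 x <;>
      simp [h1, h2, h3, h4, pv_m1, pv_m2, pv_m3, pv_m4, pv_m5, ih, List.countP_cons] <;>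
      omega

-- A's guarded counts coincide with B's independent counts (disjointness).
theorem pv_c2 (l : List String) :
    l.countP (fun x => !pvP1 x && pvP2 x) = l.countP pvP2 := by
  apply List.countP_congr
  intro x _
  cases h2 : pvP2 x
  · simp [h2]
  · have h1 : pvP1 x = false := by
      have := pv_n12 x
      simpa [h2] using this
    simp [h1, h2]

theorem pv_c3 (l : List String) :
    l.countP (fun x => !pvP1 x && !pvP2 x && pvP3 x) = l.countP pvP3 := by
  apply List.countP_congr
  intro x _
  cases h3 : pvP3 x
  · simp [h3]
  · have h1 : pvP1 x = false := by
      have := pv_n13 x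
      simpa [h3] using this
    have h2 : pvP2 x = false := by
      have := pv_n23 x
      simpa [h3] using this
    simp [h1, h2, h3]

theorem pv_c4 (l : List String) :
    l.countP (fun x => !pvP1 x && !pvP2 x && !pvP3 x && pvP4 x) = l.countP pvP4 := by
  apply List.countP_congr
  intro x _
  cases h4 : pvP4 x
  · simp [h4]
  · obtain ⟨h1, h2, h3⟩ := pv_n4 x h4
    simp [h1, h2, h3, h4]

-- The else-count is the complement of the total length.
theorem pv_c5 (l : List String) :
    (l.countP (fun x => !pvP1 x && !pvP2 x && !pvP3 x && !pvP4 x) : Int) =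
    (l.length : Int) - l.countP pvP1 - l.countP pvP2 - l.countP pvP3 - l.countP pvP4 := by
  induction l with
  | nil => simp
  | cons x xs ih =>
    have n12 := pv_n12 x
    have n13 := pv_n13 x
    have n14 := pv_n14 x
    have n23 := pv_n23 x
    have n24 := pv_n24 x
    have n34 := pv_n34 x
    cases h1 : pvP1 x <;> cases h2 : pvP2 x <;> cases h3 : pvP3 x <;> cases h4 : pvP4 x <;>
      simp_all [List.countP_cons] <;> omega

-- ===== VERDICT (by name: the statement is the Claim_ definition above) =====
theorem analyze_feature_categories_py_spec : Claim_equal_analyze_feature_categories_py := by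
  intro columns _
  unfold Spec_analyze_feature_categories_py
  unfold analyze_feature_categories_py analyze_feature_categories_py_alt
  simp only [show ∀ c, PySem.Str.startswith c "trad_" = pvP1 c from fun _ => rfl,
             show ∀ c, PySem.Str.startswith c "pop_" = pvP2 c from fun _ => rfl,
             show ∀ c, PySem.Str.startswith c "comp_" = pvP3 c from fun _ => rfl,
             show ∀ c : String, (c == "lat" || c == "lon" || c == "station_id") = pvP4 c from fun _ => rfl]
  rw [show ((((((PySem.Dict.empty : PySem.Dict String Int)).insert "traditional_osm" 0).insert "population" 0).insert
        "comprehensive_osm" 0).insert "coordinates" 0).insert "other" 0 =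
      PySem.Dict.mk [("traditional_osm", 0), ("population", 0), ("comprehensive_osm", 0),
        ("coordinates", 0), ("other", 0)] from rfl]
  rw [pv_fold_items]
  rw [pv_c2, pv_c3, pv_c4]
  simp [pv_c5]
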